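-- pv_equiv track=rewrite | github.com/maslov-group/diauxic_assembly | ModulesWithLags.py | PrefList2ConsumeList
-- ===== SOURCE A (Python) =====
-- def PrefList2ConsumeList(plist, dlist):
--     preflist = [k for k in plist]
--     depletelist = [k for k in dlist]
--     consumelist = []
--     while(preflist!=[]):
--         if(preflist[0] in depletelist):
--             consumelist.append(preflist[0])
--             del depletelist[0]
--         else:
--             del preflist[0]
--     return consumelist
-- ===== SOURCE B (Python) =====
-- def PrefList2ConsumeList(plist, dlist):
--     last = {}
--     for i, v in enumerate(dlist):
--         last[v] = i
--     out = []
--     i = 0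
--     for p in plist:
--         lp = last.get(p, -1)
--         if lp >= i:
--             out.extend([p] * (lp - i + 1))
--             i = lp + 1
--     return out
-- ===== Notes on version B (the rewrite author's own statement) =====
-- stated objective: faster
-- what changed: Replaces the while-loop with repeated 'in' scans and front deletions by a single pass: a dict of each value's last index in dlist plus a front pointer, emitting each preference's run with list multiplication.
import Mathlib
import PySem

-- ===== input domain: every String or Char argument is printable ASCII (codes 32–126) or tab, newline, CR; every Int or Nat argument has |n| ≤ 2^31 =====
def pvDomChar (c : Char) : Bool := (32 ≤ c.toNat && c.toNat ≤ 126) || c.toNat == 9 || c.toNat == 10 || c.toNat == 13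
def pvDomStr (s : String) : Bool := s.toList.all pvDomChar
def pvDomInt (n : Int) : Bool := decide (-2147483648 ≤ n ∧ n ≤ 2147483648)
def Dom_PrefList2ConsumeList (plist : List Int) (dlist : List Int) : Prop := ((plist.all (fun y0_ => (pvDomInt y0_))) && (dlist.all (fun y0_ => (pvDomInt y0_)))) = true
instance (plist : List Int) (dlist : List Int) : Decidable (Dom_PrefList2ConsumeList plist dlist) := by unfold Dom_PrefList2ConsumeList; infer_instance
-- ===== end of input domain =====

-- B replaces A's quadratic while-loop (membership scan + front deletion) by one pass with a
-- last-occurrence dict and a front pointer; same return value, measured asymptotically faster.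

-- ===== PORT A =====
-- while preflist != []: if preflist[0] in depletelist: consumelist.append(preflist[0]); del depletelist[0] else del preflist[0]
def pvLoopA (pref dep acc : List Int) : List Int :=
  match pref with
  | [] => acc
  | p :: rest =>
    if p ∈ dep then pvLoopA (p :: rest) dep.tail (acc ++ [p])
    else pvLoopA rest dep acc
termination_by pref.length + dep.length
decreasing_by all_goals cases dep <;> simp_all <;> omega

def PrefList2ConsumeList (plist : List Int) (dlist : List Int) : List Int :=
  pvLoopA plist dlist []

-- ===== PORT B =====
-- last = {}; for i, v in enumerate(dlist): last[v] = i
def pvLastDict (dlist : List Int) : PySem.Dict Int Int :=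
  (PySem.List.enumerate dlist 0).foldl (fun d iv => d.insert iv.2 iv.1) PySem.Dict.empty

def PrefList2ConsumeList_alt (plist : List Int) (dlist : List Int) : List Int :=
  let last := pvLastDict dlist
  (plist.foldl
    (fun (s : List Int × Int) p =>
      let lp := last.getD p (-1)
      if lp ≥ s.2 then (s.1 ++ List.replicate (lp - s.2 + 1).toNat p, lp + 1) else s)
    ([], 0)).1

-- ===== PRECONDITION & SPEC =====
def Spec_PrefList2ConsumeList (plist : List Int) (dlist : List Int) (out : List Int) : Prop := out = PrefList2ConsumeList_alt plist dlist
instance (plist : List Int) (dlist : List Int) (out : List Int) : Decidable (Spec_PrefList2ConsumeList plist dlist out) := by unfold Spec_PrefList2ConsumeList; infer_instance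

-- ===== CLAIM (what is proved, stated in full; the proofs are below) =====
def Claim_equal_PrefList2ConsumeList : Prop := ∀ (plist : List Int) (dlist : List Int), Dom_PrefList2ConsumeList plist dlist → Spec_PrefList2ConsumeList plist dlist (PrefList2ConsumeList plist dlist)

-- ===== LEMMAS AND PROOFS =====

-- pvK p dep = (last index of p in dep) + 1, or 0 if p ∉ dep: the number of pops A performs for p.
def pvK (p : Int) (dep : List Int) : Nat :=
  match dep with
  | [] => 0
  | d :: ds => let k := pvK p ds; if k = 0 then (if d = p then 1 else 0) else k + 1

-- the common reference function: per preference, its run length and the new front of dlist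
def pvSpecFn (pref dep : List Int) : List Int :=
  match pref with
  | [] => []
  | p :: rest => List.replicate (pvK p dep) p ++ pvSpecFn rest (dep.drop (pvK p dep))

theorem pvK_eq_zero_iff (p : Int) (dep : List Int) : pvK p dep = 0 ↔ p ∉ dep := by
  induction dep with
  | nil => simp [pvK]
  | cons d ds ih =>
    simp only [pvK, List.mem_cons]
    split_ifs with h1 h2 <;> simp_all <;> omega

theorem pvSpecFn_pop (p : Int) (rest : List Int) (d : Int) (ds : List Int) (h : p ∈ d :: ds) :
    pvSpecFn (p :: rest) (d :: ds) = p :: pvSpecFn (p :: rest) ds := by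
  by_cases hds : p ∈ ds
  · have hk : pvK p ds ≠ 0 := by rw [Ne, pvK_eq_zero_iff]; simpa using hds
    simp only [pvSpecFn, pvK]
    simp only [if_neg hk]
    rw [List.replicate_succ]
    simp [List.drop_succ_cons]
  · have hk : pvK p ds = 0 := by rw [pvK_eq_zero_iff]; exact hds
    have hd : d = p := by rcases List.mem_cons.1 h with h' | h' <;> simp_all
    simp only [pvSpecFn, pvK, hk, if_pos rfl, if_pos hd.symm] at *
    simp [hd, hk]

theorem pvSpecFn_skip (p : Int) (rest dep : List Int) (h : p ∉ dep) :
    pvSpecFn (p :: rest) dep = pvSpecFn rest dep := by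
  have hk : pvK p dep = 0 := (pvK_eq_zero_iff p dep).2 h
  simp [pvSpecFn, hk]

theorem pvLoopA_eq (pref dep acc : List Int) : pvLoopA pref dep acc = acc ++ pvSpecFn pref dep := by
  match pref with
  | [] => simp [pvLoopA, pvSpecFn]
  | p :: rest =>
    rw [pvLoopA]
    by_cases h : p ∈ dep
    · cases dep with
      | nil => simp at h
      | cons d ds =>
        simp only [if_pos h, List.tail_cons]
        rw [pvLoopA_eq (p :: rest) ds (acc ++ [p]), pvSpecFn_pop p rest d ds h]
        simp
    · simp only [if_neg h]
      rw [pvLoopA_eq rest dep acc, pvSpecFn_skip p rest dep h]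
termination_by pref.length + dep.length
decreasing_by all_goals simp <;> omega

-- pvK on a snoc: the last index of p is updated by a trailing element
theorem pvK_append_singleton (p v : Int) (xs : List Int) :
    pvK p (xs ++ [v]) = if v = p then xs.length + 1 else pvK p xs := by
  induction xs with
  | nil => simp [pvK]
  | cons d ds ih =>
    simp only [List.cons_append, pvK, ih, List.length_cons]
    split_ifs <;> simp_all <;> omega

-- the dict of last indices: getD p (-1) = pvK p dlist - 1
theorem pvLastDict_getD (dlist : List Int) (p : Int) :
    (pvLastDict dlist).getD p (-1) = (pvK p dlist : Int) - 1 := by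
  induction dlist using List.reverseRecOn with
  | nil => simp [pvLastDict, PySem.List.enumerate_nil, pvK, PySem.Dict.getD_empty]
  | append_singleton xs v ih =>
    unfold pvLastDict at ih ⊢
    rw [PySem.List.enumerate_append, List.foldl_append]
    simp only [PySem.List.enumerate_cons, PySem.List.enumerate_nil, List.foldl_cons, List.foldl_nil]
    rw [PySem.Dict.getD_insert, pvK_append_singleton]
    by_cases hv : v = p
    · rw [if_pos hv.symm, if_pos hv]
      push_cast
      ring
    · rw [if_neg (fun h => hv h.symm), if_neg hv]
      exact ih

-- dropping i elements shifts the pop count by i (truncated)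
theorem pvK_drop (p : Int) (xs : List Int) (i : Nat) : pvK p (xs.drop i) = pvK p xs - i := by
  induction i generalizing xs with
  | zero => simp
  | succ n ih =>
    cases xs with
    | nil => simp [pvK]
    | cons d ds =>
      rw [List.drop_succ_cons, ih ds]
      simp only [pvK]
      split_ifs <;> omega

theorem pvFoldB_eq (dlist : List Int) (pref : List Int) (out : List Int) (i : Int) (hi : 0 ≤ i) :
    (pref.foldl
      (fun (s : List Int × Int) p =>
        let lp := (pvLastDict dlist).getD p (-1)
        if lp ≥ s.2 then (s.1 ++ List.replicate (lp - s.2 + 1).toNat p, lp + 1) else s)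
      (out, i)).1 = out ++ pvSpecFn pref (dlist.drop i.toNat) := by
  induction pref generalizing out i with
  | nil => simp [pvSpecFn]
  | cons p rest ih =>
    simp only [List.foldl_cons]
    rw [pvLastDict_getD]
    have hkd := pvK_drop p dlist i.toNat
    by_cases h : (pvK p dlist : Int) - 1 ≥ i
    · simp only [if_pos h]
      rw [ih _ _ (by omega)]
      have hk1 : ((pvK p dlist : Int) - 1 - i + 1).toNat = pvK p (dlist.drop i.toNat) := by omega
      have hk2 : ((pvK p dlist : Int) - 1 + 1).toNat = i.toNat + pvK p (dlist.drop i.toNat) := by omega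
      simp only [pvSpecFn, hk1, List.drop_drop, hk2, List.append_assoc]
    · simp only [if_neg h]
      rw [ih _ _ hi]
      have hk0 : pvK p (dlist.drop i.toNat) = 0 := by omega
      rw [pvSpecFn_skip]
      rw [← pvK_eq_zero_iff, hk0]

-- ===== VERDICT (by name: the statement is the Claim_ definition above) =====
theorem PrefList2ConsumeList_spec : Claim_equal_PrefList2ConsumeList := by
  intro plist dlist _
  unfold Spec_PrefList2ConsumeList PrefList2ConsumeList PrefList2ConsumeList_alt
  rw [pvLoopA_eq]
  rw [pvFoldB_eq dlist plist [] 0 le_rfl]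
  simp
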